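-- pv_equiv track=rewrite | github.com/mitchwall85/physics_utils | physics_utils/freestream_conditions/monaco_faster_5sp/earthgram_parser.py | _extract_table_blocks
-- ===== SOURCE A (Python) =====
-- def _extract_table_blocks(text: str) -> list[list[str]]:
--     """Extract consecutive markdown table lines into standalone blocks."""
--     lines = text.splitlines()
--     blocks: list[list[str]] = []
--     current: list[str] = []
--
--     for line in lines:
--         if "|" in line:
--             current.append(line)
--             continue
--
--         if current:
--             blocks.append(current)
--             current = []
--
--     if current:
--         blocks.append(current)
--
--     return blocks
-- ===== SOURCE B (Python) =====
-- def _extract_table_blocks(text: str) -> list[list[str]]: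
--     """Extract consecutive markdown table lines into standalone blocks.
--
--     Two-pointer run scanner: find each maximal run of lines containing '|'
--     and slice it out directly; no running accumulator, no trailing flush.
--     """
--     lines = text.splitlines()
--     blocks: list[list[str]] = []
--     n = len(lines)
--     i = 0
--     while i < n:
--         if "|" in lines[i]:
--             j = i
--             while j < n and "|" in lines[j]:
--                 j += 1
--             blocks.append(lines[i:j])
--             i = j
--         else:
--             i += 1
--     return blocks
-- ===== Notes on version B (the rewrite author's own statement) =====
-- stated objective: alternative
-- what changed: Replaced the line-by-line accumulator with its separate trailing-flush branch by a two-pointer run scanner that finds each maximal run of pipe-containing lines and slices it out of the line list directly.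
import Mathlib
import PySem

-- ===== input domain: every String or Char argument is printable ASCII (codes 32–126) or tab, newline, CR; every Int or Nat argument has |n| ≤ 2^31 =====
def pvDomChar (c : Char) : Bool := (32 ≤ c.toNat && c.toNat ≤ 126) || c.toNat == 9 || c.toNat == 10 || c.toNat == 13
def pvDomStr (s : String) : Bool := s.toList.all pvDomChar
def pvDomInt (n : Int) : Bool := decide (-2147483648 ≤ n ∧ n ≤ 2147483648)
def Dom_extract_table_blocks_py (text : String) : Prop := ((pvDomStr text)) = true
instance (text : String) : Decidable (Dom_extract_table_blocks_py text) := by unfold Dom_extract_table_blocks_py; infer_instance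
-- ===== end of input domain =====

-- B replaces A's line-by-line accumulator (with its separate trailing flush) by a
-- two-pointer run scanner that slices each maximal run of pipe-containing lines out directly
-- (objective: alternative decomposition, same cost).

-- ===== PORT A =====
def pvKey (line : String) : Bool := PySem.Str.isIn "|" line

-- the for-loop of A: state = (blocks, current), returned at loop exit
def pvLoopA : List String → List (List String) → List String → (List (List String) × List String)
  | [], blocks, current => (blocks, current)
  | line :: rest, blocks, current =>
    if pvKey line then
      pvLoopA rest blocks (current ++ [line])
    else if current ≠ [] then
      pvLoopA rest (blocks ++ [current]) []
    else
      pvLoopA rest blocks current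

def extract_table_blocks_py (text : String) : List (List String) :=
  let lines := PySem.Str.splitlines text
  let s := pvLoopA lines [] []
  -- trailing flush: if current: blocks.append(current)
  if s.2 ≠ [] then s.1 ++ [s.2] else s.1

-- ===== PORT B =====
-- inner while of Source B: 'while j < n and "|" in lines[j]: j += 1'
-- (lines.getD j "" is lines[j]; the j < n guard keeps the index in range;
--  the fuel argument n - j only makes the loop total: it never cuts it short)
def pvScanBF (lines : List String) (n : Nat) : Nat → Nat → Nat
  | 0, j => j
  | fuel + 1, j =>
    if j < n ∧ pvKey (lines.getD j "") then pvScanBF lines n fuel (j + 1) else j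

def pvScanB (lines : List String) (n j : Nat) : Nat :=
  pvScanBF lines n (n - j) j

-- outer while of Source B (fuel n - i is only a totality bound, as above)
def pvLoopBF (lines : List String) (n : Nat) :
    Nat → Nat → List (List String) → List (List String)
  | 0, _, blocks => blocks
  | fuel + 1, i, blocks =>
    if i < n then
      if pvKey (lines.getD i "") then
        let j := pvScanB lines n i
        pvLoopBF lines n fuel j (blocks ++ [PySem.List.slice lines (some (i : Int)) (some (j : Int))])
      else
        pvLoopBF lines n fuel (i + 1) blocks
    else blocks

def extract_table_blocks_py_alt (text : String) : List (List String) :=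
  let lines := PySem.Str.splitlines text
  pvLoopBF lines lines.length lines.length 0 []

-- ===== PRECONDITION & SPEC =====
def Spec_extract_table_blocks_py (text : String) (out : List (List String)) : Prop := out = extract_table_blocks_py_alt text
instance (text : String) (out : List (List String)) : Decidable (Spec_extract_table_blocks_py text out) := by unfold Spec_extract_table_blocks_py; infer_instance

-- ===== CLAIM (what is proved, stated in full; the proofs are below) =====
def Claim_equal_extract_table_blocks_py : Prop := ∀ (text : String), Dom_extract_table_blocks_py text → Spec_extract_table_blocks_py text (extract_table_blocks_py text)

-- ===== LEMMAS AND PROOFS =====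

theorem pvDropWhile_len_le (ls : List String) : (List.dropWhile pvKey ls).length ≤ ls.length := by
  have h := congrArg List.length (List.takeWhile_append_dropWhile (p := pvKey) (l := ls))
  simp only [List.length_append] at h
  omega

def pvBlocksOf : List String → List (List String)
  | [] => []
  | l :: ls =>
    if pvKey l then
      (l :: ls.takeWhile pvKey) :: pvBlocksOf (ls.dropWhile pvKey)
    else
      pvBlocksOf ls
termination_by ls => ls.length
decreasing_by
  · have h := pvDropWhile_len_le ls
    simp only [List.length_cons]
    omega
  · simp

theorem pvLoopA_acc (ls : List String) : ∀ blocks current,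
    pvLoopA ls blocks current =
      (blocks ++ (pvLoopA ls [] current).1, (pvLoopA ls [] current).2) := by
  induction ls with
  | nil => intro blocks current; simp [pvLoopA]
  | cons l rest ih =>
    intro blocks current
    simp only [pvLoopA]
    by_cases hk : pvKey l
    · simp only [hk, if_true, ite_true]
      rw [ih blocks (current ++ [l]), ih [] (current ++ [l])]
    · by_cases hc : current = []
      · subst hc
        simp only [hk, Bool.false_eq_true, ite_false, ne_eq, not_true, if_false]
        rw [ih blocks [], ih [] []]
      · simp only [hk, hc, Bool.false_eq_true, ite_false, ne_eq, not_false_iff, ite_true]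
        rw [List.nil_append, ih (blocks ++ [current]) [], ih [current] []]
        simp

def pvFinishA (ls : List String) (current : List String) : List (List String) :=
  let s := pvLoopA ls [] current
  if s.2 ≠ [] then s.1 ++ [s.2] else s.1

theorem pvFinishA_eq (ls : List String) :
    (pvFinishA ls [] = pvBlocksOf ls) ∧
    (∀ c, c ≠ [] →
      pvFinishA ls c = (c ++ ls.takeWhile pvKey) :: pvBlocksOf (ls.dropWhile pvKey)) := by
  induction ls with
  | nil =>
    constructor
    · simp [pvFinishA, pvLoopA, pvBlocksOf]
    · intro c hc; simp [pvFinishA, pvLoopA, pvBlocksOf, hc]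
  | cons l rest ih =>
    by_cases hk : pvKey l
    · constructor
      · have h2 := ih.2 [l] (by simp)
        unfold pvFinishA at h2 ⊢
        simp only [pvLoopA, hk, if_true, ite_true, List.nil_append]
        rw [h2]
        simp [pvBlocksOf, hk]
      · intro c hc
        have h2 := ih.2 (c ++ [l]) (by simp)
        unfold pvFinishA at h2 ⊢
        simp only [pvLoopA, hk, if_true, ite_true]
        rw [h2]
        simp [List.takeWhile_cons, List.dropWhile_cons, hk]
    · constructor
      · have h1 := ih.1
        unfold pvFinishA at h1 ⊢
        simp only [pvLoopA, hk, Bool.false_eq_true, ite_false, ne_eq, not_true, if_false]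
        rw [h1]
        simp [pvBlocksOf, hk]
      · intro c hc
        have h1 := ih.1
        unfold pvFinishA at h1 ⊢
        simp only [pvLoopA, hk, Bool.false_eq_true, ite_false, ne_eq, hc, not_false_iff,
          if_true, ite_true, List.nil_append]
        rw [pvLoopA_acc rest [c] []]
        simp only [List.takeWhile_cons, List.dropWhile_cons, hk, Bool.false_eq_true, ite_false]
        by_cases h2 : (pvLoopA rest [] []).2 = []
        · simp only [h2, ne_eq, not_true, if_false, ite_false] at h1 ⊢
          rw [h1]
          simp [pvBlocksOf, hk]
        · simp only [h2, ne_eq, not_false_iff, if_true, ite_true] at h1 ⊢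
          rw [List.append_assoc, h1]
          simp [pvBlocksOf, hk]

theorem pvScanB_eq (lines : List String) : ∀ fuel i, lines.length - i ≤ fuel →
    i ≤ lines.length →
    pvScanBF lines lines.length fuel i = i + ((lines.drop i).takeWhile pvKey).length := by
  intro fuel
  induction fuel with
  | zero =>
    intro i hn hi
    have : i = lines.length := by omega
    subst this
    rw [pvScanBF]
    simp [List.drop_length]
  | succ fuel ih =>
    intro i hn hi
    by_cases hlt : i < lines.length
    case neg =>
      have : i = lines.length := by omega
      subst this
      rw [pvScanBF, if_neg (fun hcon => absurd hcon.1 (lt_irrefl _))]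
      simp [List.drop_length]
    have hdrop : lines.drop i = lines.getD i "" :: lines.drop (i + 1) := by
      rw [List.drop_eq_getElem_cons hlt, List.getD_eq_getElem?_getD,
        List.getElem?_eq_getElem hlt, Option.getD_some]
    rw [pvScanBF, hdrop]
    by_cases hk : pvKey (lines.getD i "")
    · rw [if_pos ⟨hlt, hk⟩, List.takeWhile_cons, if_pos hk]
      rw [ih (i + 1) (by omega) (by omega)]
      simp only [List.length_cons]
      omega
    · rw [if_neg (by tauto), List.takeWhile_cons, if_neg hk]
      simp

theorem pvTakeWhile_len_le (ls : List String) : (List.takeWhile pvKey ls).length ≤ ls.length := by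
  have h := congrArg List.length (List.takeWhile_append_dropWhile (p := pvKey) (l := ls))
  simp only [List.length_append] at h
  omega

theorem pvLoopB_eq_aux (lines : List String) : ∀ fuel i, lines.length - i ≤ fuel →
    i ≤ lines.length → ∀ blocks,
    pvLoopBF lines lines.length fuel i blocks = blocks ++ pvBlocksOf (lines.drop i) := by
  intro fuel
  induction fuel with
  | zero =>
    intro i hn hi blocks
    have : i = lines.length := by omega
    subst this
    rw [pvLoopBF]
    simp [List.drop_length, pvBlocksOf]
  | succ fuel ih =>
    intro i hn hi blocks
    by_cases hlt : i < lines.length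
    case neg =>
      have : i = lines.length := by omega
      subst this
      rw [pvLoopBF, if_neg (lt_irrefl _)]
      simp [List.drop_length, pvBlocksOf]
    have hdrop : lines.drop i = lines.getD i "" :: lines.drop (i + 1) := by
      rw [List.drop_eq_getElem_cons hlt, List.getD_eq_getElem?_getD,
        List.getElem?_eq_getElem hlt, Option.getD_some]
    rw [pvLoopBF, if_pos hlt]
    by_cases hk : pvKey (lines.getD i "")
    · rw [if_pos hk]
      set t := ((lines.drop (i + 1)).takeWhile pvKey).length with ht
      have hscan : pvScanB lines lines.length i = i + 1 + t := by
        rw [pvScanB, pvScanB_eq lines (lines.length - i) i (by omega) (by omega),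
          hdrop, List.takeWhile_cons, if_pos hk]
        simp only [List.length_cons, ht]
        omega
      have htle : t ≤ lines.length - (i + 1) := by
        have h := pvTakeWhile_len_le (lines.drop (i + 1))
        simp only [List.length_drop] at h
        omega
      have hslice : PySem.List.slice lines (some (i : Int))
          (some ((pvScanB lines lines.length i : Nat) : Int)) =
          lines.getD i "" :: (lines.drop (i + 1)).takeWhile pvKey := by
        rw [PySem.List.slice_natCast, hdrop, hscan]
        have h1 : (i + 1 + t) - i = t + 1 := by omega
        rw [h1, List.take_succ_cons]
        congr 1
        conv_lhs => rw [← List.takeWhile_append_dropWhile (p := pvKey) (l := lines.drop (i + 1))]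
        rw [List.take_append_of_le_length (by omega)]
        exact List.take_of_length_le (by omega)
      have hdropj : lines.drop (pvScanB lines lines.length i) =
          (lines.drop (i + 1)).dropWhile pvKey := by
        rw [hscan, ← List.drop_drop]
        conv_lhs => rw [← List.takeWhile_append_dropWhile (p := pvKey) (l := lines.drop (i + 1))]
        rw [List.drop_append_of_le_length (by omega)]
        simp [ht]
      rw [ih (pvScanB lines lines.length i) (by omega) (by omega) _]
      rw [hslice, hdropj, hdrop, pvBlocksOf, if_pos hk]
      simp
    · rw [if_neg hk]
      rw [ih (i + 1) (by omega) (by omega) blocks, hdrop, pvBlocksOf, if_neg hk]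

-- ===== VERDICT (by name: the statement is the Claim_ definition above) =====
theorem extract_table_blocks_py_spec : Claim_equal_extract_table_blocks_py := by
  intro text _
  unfold Spec_extract_table_blocks_py extract_table_blocks_py extract_table_blocks_py_alt
  rw [pvLoopB_eq_aux (PySem.Str.splitlines text) (PySem.Str.splitlines text).length 0
    (by omega) (by omega) []]
  simp only [List.drop_zero, List.nil_append]
  exact (pvFinishA_eq (PySem.Str.splitlines text)).1
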